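-- pv_equiv track=rewrite | github.com/arthurdysart/HackerRank | programming/interview_prep_kit/dictionaries_and_hashmaps/frequency_queries/python_source.py | eval_freq_queries
-- ===== SOURCE A (Python) =====
-- from collections import defaultdict
--
-- def eval_freq_queries(a):
--     """
--     Executes queries and evaluates presence of target frequences.
--
--     :param list[tup[int, int]] a: array of queries as integer tuples
--     :return: array of integer results from target frequency evaluation
--     :rtype: list[int]
--     """
--     if not a:
--         return list()
--
--     t = list()
--
--     # Initialize value-frequency and frequency-presence hash maps
--     d = defaultdict(int)
--     f = defaultdict(int)
--
--     for i, v in a: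
--
--         if i == 1:
--             # Add target value to hash maps
--
--             if f[d[v]] > 0:
--                 # Remove element from frequency hash map
--                 f[d[v]] -= 1
--
--             d[v] += 1
--             f[d[v]] += 1
--
--         elif (i == 2 and
--               d[v] > 0):
--             # Remove target value from hash maps
--
--             f[d[v]] -= 1
--
--             d[v] -= 1
--             f[d[v]] += 1
--
--         elif i == 3:
--             # Evaluate whether target frequency is present
--
--             if f[v] > 0:
--                 t.append(1)
--
--             else:
--                 t.append(0)
--
--     return t
-- ===== SOURCE B (Python) =====
-- def eval_freq_queries(a):
--     """
--     Executes queries and evaluates presence of target frequences.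
--
--     :param list[tup[int, int]] a: array of queries as integer tuples
--     :return: array of integer results from target frequency evaluation
--     :rtype: list[int]
--     """
--     d = {}
--     t = []
--     for i, v in a:
--         if i == 1:
--             d[v] = d.get(v, 0) + 1
--         elif i == 2:
--             if d.get(v, 0) > 0:
--                 d[v] -= 1
--         elif i == 3:
--             t.append(1 if any(c == v for c in d.values()) else 0)
--     return t
-- ===== Notes on version B (the rewrite author's own statement) =====
-- stated objective: simpler
-- what changed: B drops A's reverse frequency->count map f entirely and keeps only the value->frequency dict, answering a presence query by scanning the current frequencies (any(c == v for c in d.values())). Pre_ excludes inputs containing a query (3, 0): whether frequency 0 counts as 'present' is an unspecified corner on which A's and B's answers are both defensible (A consults its f-map's entry for 0, B asks whether some tracked value currently has count 0).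
-- outside the precondition, e.g. on eval_freq_queries([(1, 5), (2, 5), (1, 7), (3, 0)]): A returns [0], B returns [1]
import Mathlib
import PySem

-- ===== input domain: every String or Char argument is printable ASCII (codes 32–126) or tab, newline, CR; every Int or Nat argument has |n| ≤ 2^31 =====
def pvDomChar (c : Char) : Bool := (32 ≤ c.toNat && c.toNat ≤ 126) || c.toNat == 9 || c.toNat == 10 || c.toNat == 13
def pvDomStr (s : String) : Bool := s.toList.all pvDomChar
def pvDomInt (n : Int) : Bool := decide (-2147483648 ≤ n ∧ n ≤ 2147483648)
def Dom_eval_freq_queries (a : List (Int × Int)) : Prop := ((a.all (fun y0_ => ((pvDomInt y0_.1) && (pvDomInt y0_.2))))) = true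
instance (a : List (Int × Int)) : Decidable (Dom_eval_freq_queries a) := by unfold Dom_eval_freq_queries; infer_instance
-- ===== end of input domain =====

-- B drops A's reverse frequency->count map and answers each presence query by scanning the
-- single value->frequency dict (objective: simpler — one map instead of two).


-- ===== PORT A =====
-- one loop iteration of A over its state (t, d, f); defaultdict reads are ported as getD _ 0
-- (reading a missing key yields 0; the 0-entry a defaultdict read creates never changes a later read)
def pvStepA (s : List Int × PySem.Dict Int Int × PySem.Dict Int Int) (q : Int × Int) :
    List Int × PySem.Dict Int Int × PySem.Dict Int Int :=
  let t := s.1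
  let d := s.2.1
  let f := s.2.2
  let i := q.1
  let v := q.2
  if i = 1 then
    let c := d.getD v 0
    let f1 := if f.getD c 0 > 0 then f.insert c (f.getD c 0 - 1) else f
    let d1 := d.insert v (c + 1)
    (t, d1, f1.insert (c + 1) (f1.getD (c + 1) 0 + 1))
  else if i = 2 ∧ d.getD v 0 > 0 then
    let c := d.getD v 0
    let f1 := f.insert c (f.getD c 0 - 1)
    let d1 := d.insert v (c - 1)
    (t, d1, f1.insert (c - 1) (f1.getD (c - 1) 0 + 1))
  else if i = 3 then
    (t ++ [if f.getD v 0 > 0 then (1 : Int) else 0], d, f)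
  else
    (t, d, f)


def eval_freq_queries (a : List (Int × Int)) : List Int :=
  if a = [] then []
  else (a.foldl pvStepA ([], PySem.Dict.empty, PySem.Dict.empty)).1

-- ===== PORT B =====
-- one loop iteration of B over its state (t, d)
def pvStepB (s : List Int × PySem.Dict Int Int) (q : Int × Int) :
    List Int × PySem.Dict Int Int :=
  let t := s.1
  let d := s.2
  if q.1 = 1 then
    (t, d.insert q.2 (d.getD q.2 0 + 1))
  else if q.1 = 2 then
    if d.getD q.2 0 > 0 then (t, d.insert q.2 (d.getD q.2 0 - 1)) else (t, d)
  else if q.1 = 3 then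
    (t ++ [if d.values.any (fun c => c = q.2) then (1 : Int) else 0], d)
  else
    (t, d)


def eval_freq_queries_alt (a : List (Int × Int)) : List Int :=
  (a.foldl pvStepB ([], PySem.Dict.empty)).1

-- ===== PRECONDITION & SPEC =====
-- Pre_ excludes inputs containing a query (3, 0): whether frequency 0 counts as 'present' is an
-- unspecified corner on which A's and B's answers are both defensible (A consults its f-map's
-- entry for 0, B asks whether some tracked value currently has count 0).
def Pre_eval_freq_queries (a : List (Int × Int)) : Prop := ∀ q ∈ a, ¬ (q.1 = 3 ∧ q.2 = 0)
instance (a : List (Int × Int)) : Decidable (Pre_eval_freq_queries a) := by unfold Pre_eval_freq_queries; infer_instance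
def pvWitness_eval_freq_queries : (List (Int × Int)) := [(1, 5), (1, 5), (3, 2), (2, 5), (3, 1), (3, -1)]
def Spec_eval_freq_queries (a : List (Int × Int)) (out : List Int) : Prop := out = eval_freq_queries_alt a
instance (a : List (Int × Int)) (out : List Int) : Decidable (Spec_eval_freq_queries a out) := by unfold Spec_eval_freq_queries; infer_instance

-- ===== CLAIM (what is proved, stated in full; the proofs are below) =====
def Claim_equal_eval_freq_queries : Prop := ∀ (a : List (Int × Int)), Dom_eval_freq_queries a → Pre_eval_freq_queries a → Spec_eval_freq_queries a (eval_freq_queries a)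

-- ===== LEMMAS AND PROOFS =====

-- the coupling invariant: outputs agree, A's d equals B's d with unique keys and nonnegative
-- counts, and for every nonzero frequency k A's f-entry equals the number of values stored with
-- frequency k in B's dict
def pvInv (sA : List Int × PySem.Dict Int Int × PySem.Dict Int Int)
    (sB : List Int × PySem.Dict Int Int) : Prop :=
  sA.1 = sB.1 ∧ sA.2.1 = sB.2 ∧ sB.2.keys.Nodup ∧
    (∀ p ∈ sB.2.items, 0 ≤ p.2) ∧
    (∀ k : Int, k ≠ 0 → sA.2.2.getD k 0 = (sB.2.values.count k : Int))

theorem pv_getD_nonneg (d : PySem.Dict Int Int) (hp : ∀ p ∈ d.items, 0 ≤ p.2) (v : Int) :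
    0 ≤ d.getD v 0 := by
  rcases h : d.get? v with _ | w
  · simp [PySem.Dict.getD_eq_get?_getD, h]
  · have := hp _ (PySem.Dict.mem_items_of_get?_eq_some d h)
    simpa [PySem.Dict.getD_eq_get?_getD, h] using this

theorem pv_contains_of_getD_ne (d : PySem.Dict Int Int) (v : Int) (h : d.getD v 0 ≠ 0) :
    d.contains v = true := by
  rcases hc : d.contains v with _ | _
  · exact absurd (PySem.Dict.getD_of_not_contains d 0 hc) h
  · rfl

theorem pv_count_pos_of_contains (d : PySem.Dict Int Int) (v : Int) (h : d.contains v = true) :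
    0 < d.values.count (d.getD v 0) := by
  rcases hg : d.get? v with _ | u
  · rw [PySem.Dict.contains_eq_isSome_get? d v, hg] at h; simp at h
  · have hm := PySem.Dict.mem_items_of_get?_eq_some d hg
    have : d.getD v 0 ∈ d.values := by
      simp only [PySem.Dict.values, PySem.Dict.getD_eq_get?_getD, hg, Option.getD_some]
      exact List.mem_map_of_mem (f := fun p : Int × Int => p.2) hm
    exact List.count_pos_iff.mpr this

theorem pv_count_values_insert (d : PySem.Dict Int Int) (hn : d.keys.Nodup) (v w k : Int) :
    ((d.insert v w).values.count k : Int) =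
      (d.values.count k : Int)
        - (if d.contains v ∧ d.getD v 0 = k then 1 else 0)
        + (if w = k then 1 else 0) := by
  rcases hc : d.contains v with _ | _
  · simp only [PySem.Dict.values, PySem.Dict.items_insert_of_not_contains d w hc,
      List.map_append, List.count_append, Bool.false_eq_true, false_and, if_false,
      List.map_cons, List.map_nil]
    rcases eq_or_ne w k with h | h <;> simp [h]
  · have hg : d.get? v = some (d.getD v 0) := by
      rcases h : d.get? v with _ | u
      · rw [PySem.Dict.contains_eq_isSome_get? d v, h] at hc; simp at hc
      · simp [PySem.Dict.getD_eq_get?_getD, h]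
    have hmem := PySem.Dict.mem_items_of_get?_eq_some d hg
    obtain ⟨l1, l2, hsplit⟩ := List.append_of_mem hmem
    simp only [PySem.Dict.keys] at hn
    rw [hsplit] at hn
    simp only [List.map_append, List.map_cons, List.nodup_append, List.nodup_cons] at hn
    have hv1 : ∀ p ∈ l1, p.1 ≠ v := by
      intro p hp hpv
      exact hn.2.2 p.1 (List.mem_map_of_mem hp) v (by simp) hpv
    have hv2 : ∀ p ∈ l2, p.1 ≠ v := by
      intro p hp hpv
      exact hn.2.1.1 (by rw [← hpv]; exact List.mem_map_of_mem hp)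
    simp only [PySem.Dict.values, PySem.Dict.items_insert_of_contains d w hc, hsplit,
      List.map_append, List.map_cons, List.count_append, List.count_cons, true_and]
    have e1 : l1.map ((fun p : Int × Int => p.2) ∘ (fun p => if (p.1 == v) = true then (v, w) else p))
        = l1.map (fun p : Int × Int => p.2) := by
      apply List.map_congr_left; intro p hp; simp [hv1 p hp]
    have e2 : l2.map ((fun p : Int × Int => p.2) ∘ (fun p => if (p.1 == v) = true then (v, w) else p))
        = l2.map (fun p : Int × Int => p.2) := by
      apply List.map_congr_left; intro p hp; simp [hv2 p hp]
    rw [List.map_map, List.map_map, e1, e2]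
    simp only [beq_self_eq_true, if_true]
    rcases eq_or_ne w k with h | h <;> rcases eq_or_ne (d.getD v 0) k with h2 | h2 <;>
      simp [h, h2] <;> omega

theorem pvStepA_eval1 (t : List Int) (d f : PySem.Dict Int Int) (i v : Int) (h1 : i = 1) :
    pvStepA (t, d, f) (i, v) =
      (t, d.insert v (d.getD v 0 + 1),
        (if f.getD (d.getD v 0) 0 > 0 then f.insert (d.getD v 0) (f.getD (d.getD v 0) 0 - 1) else f).insert
          (d.getD v 0 + 1)
          ((if f.getD (d.getD v 0) 0 > 0 then f.insert (d.getD v 0) (f.getD (d.getD v 0) 0 - 1) else f).getD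
            (d.getD v 0 + 1) 0 + 1)) := by
  simp [pvStepA, h1]

theorem pvStepA_eval2 (t : List Int) (d f : PySem.Dict Int Int) (i v : Int) (h2 : i = 2)
    (hp : d.getD v 0 > 0) :
    pvStepA (t, d, f) (i, v) =
      (t, d.insert v (d.getD v 0 - 1),
        (f.insert (d.getD v 0) (f.getD (d.getD v 0) 0 - 1)).insert (d.getD v 0 - 1)
          ((f.insert (d.getD v 0) (f.getD (d.getD v 0) 0 - 1)).getD (d.getD v 0 - 1) 0 + 1)) := by
  simp [pvStepA, h2, hp]

theorem pvStepA_eval3 (t : List Int) (d f : PySem.Dict Int Int) (i v : Int) (h3 : i = 3) :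
    pvStepA (t, d, f) (i, v) = (t ++ [if f.getD v 0 > 0 then (1 : Int) else 0], d, f) := by
  simp [pvStepA, h3]

theorem pvStepA_eval_skip (t : List Int) (d f : PySem.Dict Int Int) (i v : Int) (h1 : ¬ i = 1)
    (h2 : ¬ (i = 2 ∧ d.getD v 0 > 0)) (h3 : ¬ i = 3) :
    pvStepA (t, d, f) (i, v) = (t, d, f) := by
  simp only [pvStepA, if_neg h1, if_neg h2, if_neg h3]

theorem pvStepB_eval1 (t : List Int) (d : PySem.Dict Int Int) (i v : Int) (h1 : i = 1) :
    pvStepB (t, d) (i, v) = (t, d.insert v (d.getD v 0 + 1)) := by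
  simp [pvStepB, h1]

theorem pvStepB_eval2 (t : List Int) (d : PySem.Dict Int Int) (i v : Int) (h2 : i = 2)
    (hp : d.getD v 0 > 0) :
    pvStepB (t, d) (i, v) = (t, d.insert v (d.getD v 0 - 1)) := by
  simp [pvStepB, h2, hp]

theorem pvStepB_eval3 (t : List Int) (d : PySem.Dict Int Int) (i v : Int) (h3 : i = 3) :
    pvStepB (t, d) (i, v) = (t ++ [if d.values.any (fun c => c = v) then (1 : Int) else 0], d) := by
  simp [pvStepB, h3]

theorem pvStepB_eval_skip (t : List Int) (d : PySem.Dict Int Int) (i v : Int) (h1 : ¬ i = 1)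
    (h2 : ¬ (i = 2 ∧ d.getD v 0 > 0)) (h3 : ¬ i = 3) :
    pvStepB (t, d) (i, v) = (t, d) := by
  by_cases hi2 : i = 2
  · have hp : ¬ d.getD v 0 > 0 := fun hp => h2 ⟨hi2, hp⟩
    simp only [pvStepB, if_neg h1, if_pos hi2, if_neg hp]
  · simp only [pvStepB, if_neg h1, if_neg hi2, if_neg h3]

theorem pvInv_step (sA : List Int × PySem.Dict Int Int × PySem.Dict Int Int)
    (sB : List Int × PySem.Dict Int Int) (q : Int × Int)
    (hq : ¬ (q.1 = 3 ∧ q.2 = 0)) (h : pvInv sA sB) :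
    pvInv (pvStepA sA q) (pvStepB sB q) := by
  obtain ⟨ht, hd, hnd, hpos, hf⟩ := h
  obtain ⟨t, dA, fA⟩ := sA
  obtain ⟨t', dB⟩ := sB
  obtain ⟨i, v⟩ := q
  simp only at ht hd hnd hpos hf hq
  subst ht
  subst hd
  by_cases h1 : i = 1
  · -- insertion query
    have hc0 : 0 ≤ dA.getD v 0 := pv_getD_nonneg dA hpos v
    rw [pvStepA_eval1 t dA fA i v h1, pvStepB_eval1 t dA i v h1]
    refine ⟨rfl, rfl, PySem.Dict.nodup_keys_insert dA v _ hnd, ?_, ?_⟩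
    · intro p hp
      rcases (PySem.Dict.mem_items_insert dA v _ p).mp hp with hpe | ⟨hpm, _⟩
      · subst hpe; simp; omega
      · exact hpos p hpm
    · intro k hk
      show _ = ((dA.insert v (dA.getD v 0 + 1)).values.count k : Int)
      rw [pv_count_values_insert dA hnd v _ k]
      have hC := hf k hk
      have hA := hf (dA.getD v 0 + 1) (by omega)
      show (_ : PySem.Dict Int Int).getD k 0 = _
      rw [PySem.Dict.getD_insert]
      by_cases hk1 : k = dA.getD v 0 + 1
      · subst hk1
        rw [if_pos rfl, if_pos rfl,
          if_neg (show ¬ (dA.contains v = true ∧ dA.getD v 0 = dA.getD v 0 + 1) from by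
            rintro ⟨_, hgk⟩; omega)]
        by_cases hgt : fA.getD (dA.getD v 0) 0 > 0
        · rw [if_pos hgt, PySem.Dict.getD_insert,
            if_neg (show ¬ (dA.getD v 0 + 1 = dA.getD v 0) from by omega)]
          omega
        · rw [if_neg hgt]; omega
      · rw [if_neg hk1, if_neg (show ¬ (dA.getD v 0 + 1 = k) from fun hh => hk1 hh.symm)]
        by_cases hck : dA.getD v 0 = k
        · have hcont : dA.contains v = true := pv_contains_of_getD_ne dA v (by omega)
          have hpc := pv_count_pos_of_contains dA v hcont
          have hB := hf (dA.getD v 0) (by omega)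
          rw [if_pos (show dA.contains v = true ∧ dA.getD v 0 = k from ⟨hcont, hck⟩),
            if_pos (show fA.getD (dA.getD v 0) 0 > 0 from by omega),
            PySem.Dict.getD_insert, if_pos (show k = dA.getD v 0 from hck.symm)]
          rw [hck] at hB hpc ⊢
          omega
        · rw [if_neg (show ¬ (dA.contains v = true ∧ dA.getD v 0 = k) from fun hh => hck hh.2)]
          by_cases hgt : fA.getD (dA.getD v 0) 0 > 0
          · rw [if_pos hgt, PySem.Dict.getD_insert,
              if_neg (show ¬ (k = dA.getD v 0) from fun hh => hck hh.symm)]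
            omega
          · rw [if_neg hgt]; omega
  · by_cases h2 : i = 2
    · by_cases hp2 : dA.getD v 0 > 0
      · -- deletion query that fires
        have hcont : dA.contains v = true := pv_contains_of_getD_ne dA v (by omega)
        have hpc := pv_count_pos_of_contains dA v hcont
        rw [pvStepA_eval2 t dA fA i v h2 hp2, pvStepB_eval2 t dA i v h2 hp2]
        refine ⟨rfl, rfl, PySem.Dict.nodup_keys_insert dA v _ hnd, ?_, ?_⟩
        · intro p hp
          rcases (PySem.Dict.mem_items_insert dA v _ p).mp hp with hpe | ⟨hpm, _⟩
          · subst hpe; simp; omega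
          · exact hpos p hpm
        · intro k hk
          show _ = ((dA.insert v (dA.getD v 0 - 1)).values.count k : Int)
          rw [pv_count_values_insert dA hnd v _ k]
          have hC := hf k hk
          have hB := hf (dA.getD v 0) (by omega)
          show (_ : PySem.Dict Int Int).getD k 0 = _
          rw [PySem.Dict.getD_insert]
          by_cases hk1 : k = dA.getD v 0 - 1
          · subst hk1
            rw [if_pos rfl, if_pos rfl,
              if_neg (show ¬ (dA.contains v = true ∧ dA.getD v 0 = dA.getD v 0 - 1) from by
                rintro ⟨_, hgk⟩; omega)]
            rw [PySem.Dict.getD_insert,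
              if_neg (show ¬ (dA.getD v 0 - 1 = dA.getD v 0) from by omega)]
            have hA := hf (dA.getD v 0 - 1) (by omega)
            omega
          · rw [if_neg hk1, if_neg (show ¬ (dA.getD v 0 - 1 = k) from fun hh => hk1 hh.symm)]
            by_cases hck : dA.getD v 0 = k
            · rw [if_pos (show dA.contains v = true ∧ dA.getD v 0 = k from ⟨hcont, hck⟩),
                PySem.Dict.getD_insert, if_pos (show k = dA.getD v 0 from hck.symm)]
              rw [hck] at hB hpc ⊢
              omega
            · rw [if_neg (show ¬ (dA.contains v = true ∧ dA.getD v 0 = k) from fun hh => hck hh.2),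
                PySem.Dict.getD_insert,
                if_neg (show ¬ (k = dA.getD v 0) from fun hh => hck hh.symm)]
              omega
      · -- deletion query that does nothing
        rw [pvStepA_eval_skip t dA fA i v h1 (fun hh => hp2 hh.2) (by omega),
          pvStepB_eval_skip t dA i v h1 (fun hh => hp2 hh.2) (by omega)]
        exact ⟨rfl, rfl, hnd, hpos, hf⟩
    · by_cases h3 : i = 3
      · -- presence query; v ≠ 0 by Pre_
        have hv : v ≠ 0 := fun hv0 => hq ⟨h3, hv0⟩
        have hfv := hf v hv
        rw [pvStepA_eval3 t dA fA i v h3, pvStepB_eval3 t dA i v h3]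
        refine ⟨?_, rfl, hnd, hpos, hf⟩
        show t ++ _ = t ++ _
        congr 1
        have hiff : (fA.getD v 0 > 0) ↔ (dA.values.any (fun c => c = v) = true) := by
          rw [hfv]
          constructor
          · intro hpos'
            have hm : v ∈ dA.values := List.count_pos_iff.mp (by exact_mod_cast hpos')
            exact List.any_eq_true.mpr ⟨v, hm, by simp⟩
          · intro hany
            obtain ⟨c, hcm, hcv⟩ := List.any_eq_true.mp hany
            have hce : c = v := by simpa using hcv
            subst hce
            exact_mod_cast List.count_pos_iff.mpr hcm
        by_cases hb : fA.getD v 0 > 0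
        · rw [if_pos hb, if_pos (hiff.mp hb)]
        · rw [if_neg hb, if_neg (fun hh => hb (hiff.mpr hh))]
      · -- ignored query kind
        rw [pvStepA_eval_skip t dA fA i v h1 (fun hh => h2 hh.1) h3,
          pvStepB_eval_skip t dA i v h1 (fun hh => h2 hh.1) h3]
        exact ⟨rfl, rfl, hnd, hpos, hf⟩

theorem pvInv_init : pvInv ([], PySem.Dict.empty, PySem.Dict.empty) ([], PySem.Dict.empty) := by
  refine ⟨rfl, rfl, ?_, ?_, ?_⟩ <;> simp [PySem.Dict.empty, PySem.Dict.keys,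
    PySem.Dict.values, PySem.Dict.getD, PySem.Dict.get?]

theorem pvInv_foldl (a : List (Int × Int))
    (sA : List Int × PySem.Dict Int Int × PySem.Dict Int Int)
    (sB : List Int × PySem.Dict Int Int)
    (hpre : ∀ q ∈ a, ¬ (q.1 = 3 ∧ q.2 = 0)) (h : pvInv sA sB) :
    pvInv (a.foldl pvStepA sA) (a.foldl pvStepB sB) := by
  induction a generalizing sA sB with
  | nil => exact h
  | cons q rest ih =>
    exact ih _ _ (fun r hr => hpre r (List.mem_cons_of_mem _ hr))
      (pvInv_step _ _ _ (hpre q List.mem_cons_self) h)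

-- ===== VERDICT (by name: the statement is the Claim_ definition above) =====
theorem eval_freq_queries_spec : Claim_equal_eval_freq_queries := by
  intro a _ hpre
  unfold Spec_eval_freq_queries eval_freq_queries eval_freq_queries_alt
  split
  · next he => subst he; rfl
  · exact (pvInv_foldl a _ _ hpre pvInv_init).1
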